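-- pv_equiv track=rewrite | github.com/tanishagupta/CipherSchools-Assignments | Assignment 1/Segregate_0s_and_1s.py | func
-- ===== SOURCE A (Python) =====
-- def func(l):
--     l1 = []
--     l2 = []
--     for i in l:
--         if i==0:
--             l1.append(i)
--         elif i==1:
--             l2.append(i)
--     j = l1+l2
--     return j
-- ===== SOURCE B (Python) =====
-- def func(l):
--     return sorted(x for x in l if x == 0 or x == 1)
-- ===== Notes on version B (the rewrite author's own statement) =====
-- stated objective: idiomatic
-- what changed: Replaces the two-bucket append partition with a one-line filter of the 0/1 elements followed by a stable sort, which places all 0s before all 1s.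
import Mathlib
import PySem

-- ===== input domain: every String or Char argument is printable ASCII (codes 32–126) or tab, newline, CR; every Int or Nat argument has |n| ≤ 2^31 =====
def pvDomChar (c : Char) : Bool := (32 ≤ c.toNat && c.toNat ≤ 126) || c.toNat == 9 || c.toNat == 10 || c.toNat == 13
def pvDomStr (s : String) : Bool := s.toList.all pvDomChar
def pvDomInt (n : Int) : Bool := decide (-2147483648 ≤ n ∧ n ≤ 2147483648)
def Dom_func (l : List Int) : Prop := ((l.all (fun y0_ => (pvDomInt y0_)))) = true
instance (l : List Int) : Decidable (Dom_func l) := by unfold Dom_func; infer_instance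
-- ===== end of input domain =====

-- B replaces A's two-bucket append partition by filtering the 0/1 elements and stable-sorting them (idiomatic; same result).

-- ===== PORT A =====
def func (l : List Int) : List Int :=
  let p := l.foldl (fun (acc : List Int × List Int) i =>
    if i = 0 then (acc.1 ++ [i], acc.2)
    else if i = 1 then (acc.1, acc.2 ++ [i])
    else acc) ([], [])
  p.1 ++ p.2

-- ===== PORT B =====
def func_alt (l : List Int) : List Int :=
  PySem.List.sorted (l.filter (fun x => x == 0 || x == 1)) (fun x => x) false

-- ===== PRECONDITION & SPEC =====
def Spec_func (l : List Int) (out : List Int) : Prop := out = func_alt l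
instance (l : List Int) (out : List Int) : Decidable (Spec_func l out) := by unfold Spec_func; infer_instance

-- ===== CLAIM (what is proved, stated in full; the proofs are below) =====
def Claim_equal_func : Prop := ∀ (l : List Int), Dom_func l → Spec_func l (func l)

-- ===== LEMMAS AND PROOFS =====

-- A's loop appends each 0 to the first bucket and each 1 to the second.
theorem func_foldl_inv (l : List Int) (a b : List Int) :
    l.foldl (fun (acc : List Int × List Int) i =>
      if i = 0 then (acc.1 ++ [i], acc.2)
      else if i = 1 then (acc.1, acc.2 ++ [i])
      else acc) (a, b)
    = (a ++ l.filter (fun x => x == 0), b ++ l.filter (fun x => x == 1)) := by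
  induction l generalizing a b with
  | nil => simp
  | cons x t ih =>
    by_cases h0 : x = 0
    · simp [List.foldl, h0, ih]
    · by_cases h1 : x = 1
      · simp [List.foldl, h1, ih]
      · simp [List.foldl, h0, h1, ih]

theorem filter_perm (l : List Int) :
    (l.filter (fun x => x == 0) ++ l.filter (fun x => x == 1)).Perm
      (l.filter (fun x => x == 0 || x == 1)) := by
  induction l with
  | nil => simp
  | cons x t ih =>
    by_cases h0 : x = 0
    · simpa [h0] using ih.cons x
    · by_cases h1 : x = 1
      · subst h1
        simp only [List.filter_cons]
        simpa using (List.perm_middle.trans (ih.cons (1 : Int)))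
      · simpa [h0, h1] using ih

theorem filter_pairwise (l : List Int) :
    (l.filter (fun x => x == 0) ++ l.filter (fun x => x == 1)).Pairwise (· ≤ ·) := by
  have m0 : ∀ x ∈ l.filter (fun x => x == 0), x = (0 : Int) := by simp
  have m1 : ∀ x ∈ l.filter (fun x => x == 1), x = (1 : Int) := by simp
  refine List.pairwise_append.mpr ⟨?_, ?_, ?_⟩
  · exact List.pairwise_of_forall_mem_list (fun a ha b hb => by rw [m0 a ha, m0 b hb])
  · exact List.pairwise_of_forall_mem_list (fun a ha b hb => by rw [m1 a ha, m1 b hb])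
  · intro a ha b hb; rw [m0 a ha, m1 b hb]; norm_num

-- ===== VERDICT (by name: the statement is the Claim_ definition above) =====
theorem func_spec : Claim_equal_func := by
  intro l _
  unfold Spec_func func func_alt
  simp only [func_foldl_inv, List.nil_append]
  exact (PySem.List.sorted_id_eq_of_perm_of_pairwise _ _ (filter_perm l) (filter_pairwise l)).symm
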